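-- pv_equiv track=rewrite | github.com/Ritesh17rb/embedumap | src/embedumap/core.py | dedupe_cluster_names
-- ===== SOURCE A (Python) =====
-- from collections import Counter
--
-- def truncate(value: str, limit: int) -> str:
--     """Clamp a display value without mutating the raw row."""
--
--     text = str(value).strip()
--     if len(text) <= limit:
--         return text
--     return f"{text[: max(0, limit - 1)].rstrip()}…"
--
-- def dedupe_cluster_names(
--     proposed: dict[int, str],
--     fallback: dict[int, str],
-- ) -> dict[int, str]:
--     """Keep cluster names short, non-empty, and unique."""
--
--     final: dict[int, str] = {}
--     seen: Counter[str] = Counter()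
--     for cluster_id in sorted(fallback):
--         candidate = truncate(proposed.get(cluster_id, "").strip() or fallback[cluster_id], 48)
--         seen[candidate.casefold()] += 1
--         if seen[candidate.casefold()] > 1:
--             candidate = truncate(f"{candidate} ({seen[candidate.casefold()]})", 48)
--         final[cluster_id] = candidate
--     return final
-- ===== SOURCE B (Python) =====
-- def truncate(value: str, limit: int) -> str:
--     """Clamp a display value without mutating the raw row."""
--
--     text = str(value).strip()
--     if len(text) <= limit:
--         return text
--     return f"{text[: max(0, limit - 1)].rstrip()}…"
--
--
-- def dedupe_cluster_names(proposed, fallback):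
--     """Keep cluster names short, non-empty, and unique (group-then-number formulation).
--
--     Instead of a running Counter mutated inside one loop, compute all candidates first,
--     group the cluster ids by casefolded candidate, and number each group's members by
--     their 1-based position; only positions > 1 get a suffix.
--     """
--     keys = sorted(fallback)
--     cands = {k: truncate(proposed.get(k, "").strip() or fallback[k], 48) for k in keys}
--     groups: dict[str, list] = {}
--     for k in keys:
--         groups.setdefault(cands[k].casefold(), []).append(k)
--     occ = {k: i for ks in groups.values() for i, k in enumerate(ks, 1)}
--     return {k: cands[k] if occ[k] == 1 else truncate(f"{cands[k]} ({occ[k]})", 48)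
--             for k in keys}
-- ===== Notes on version B (the rewrite author's own statement) =====
-- stated objective: alternative
-- what changed: Replaced the single stateful loop with a running Counter and in-loop renaming by a pure three-stage pipeline: build all candidate names first, group cluster ids by casefolded candidate, then number each group's members by their 1-based position, suffixing only positions > 1.
import Mathlib
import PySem

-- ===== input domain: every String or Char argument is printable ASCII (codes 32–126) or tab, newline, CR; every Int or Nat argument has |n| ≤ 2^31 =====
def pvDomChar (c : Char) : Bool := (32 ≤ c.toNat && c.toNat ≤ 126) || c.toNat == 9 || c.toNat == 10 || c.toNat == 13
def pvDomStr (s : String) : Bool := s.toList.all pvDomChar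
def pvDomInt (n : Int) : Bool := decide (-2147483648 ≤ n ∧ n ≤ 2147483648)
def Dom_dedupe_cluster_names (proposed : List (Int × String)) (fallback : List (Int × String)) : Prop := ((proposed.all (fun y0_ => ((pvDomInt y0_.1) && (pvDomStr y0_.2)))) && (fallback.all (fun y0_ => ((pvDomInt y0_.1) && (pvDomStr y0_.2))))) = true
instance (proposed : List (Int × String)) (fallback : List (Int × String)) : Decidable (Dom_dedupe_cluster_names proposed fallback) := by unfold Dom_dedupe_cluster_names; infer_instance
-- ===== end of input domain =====

-- B replaces A's single stateful loop (running Counter + in-loop renaming) by a pure pipeline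
-- (candidates list, casefolded list, prefix-count comprehension): an alternative decomposition, not faster.

-- ===== PORT A =====
-- shared helpers: BOTH Pythons define the identical `truncate(value, limit)` and compute the same
-- candidate expression `truncate(proposed.get(cid, "").strip() or fallback[cid], 48)`.
-- (strings are handled as List Char throughout; casefold = Chars.lower, exact on the ASCII domain)
def pyTruncate (value : List Char) (limit : Int) : List Char :=
  let text := PySem.Chars.strip value
  if (text.length : Int) ≤ limit then text
  else PySem.Chars.rstrip (PySem.List.slice text none (some (max 0 (limit - 1)))) ++ ['…']

def pyCandidate (pd fb : PySem.Dict Int (List Char)) (cid : Int) : List Char :=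
  let s := PySem.Chars.strip (pd.getD cid [])
  pyTruncate (if s = [] then fb.getD cid [] else s) 48

def dedupe_cluster_names (proposed : List (Int × String)) (fallback : List (Int × String)) : List (Int × String) :=
  let pd : PySem.Dict Int (List Char) := PySem.Dict.ofList (proposed.map (fun p => (p.1, p.2.toList)))
  let fb : PySem.Dict Int (List Char) := PySem.Dict.ofList (fallback.map (fun p => (p.1, p.2.toList)))
  let res := (PySem.List.sorted fb.keys (fun x => x) false).foldl
    (fun (st : PySem.Dict Int (List Char) × PySem.Dict (List Char) Int) cid =>
      let cand := pyCandidate pd fb cid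
      let seen := st.2.modify (PySem.Chars.lower cand) 0 (· + 1)
      let n := seen.getD (PySem.Chars.lower cand) 0
      let cand' := if n > 1 then pyTruncate (cand ++ ' ' :: '(' :: (PySem.Int.toChars n ++ [')'])) 48 else cand
      (st.1.insert cid cand', seen))
    (PySem.Dict.empty, PySem.Dict.empty)
  res.1.items.map (fun p => (p.1, String.ofList p.2))

-- ===== PORT B =====
def dedupe_cluster_names_alt (proposed : List (Int × String)) (fallback : List (Int × String)) : List (Int × String) :=
  let pd : PySem.Dict Int (List Char) := PySem.Dict.ofList (proposed.map (fun p => (p.1, p.2.toList)))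
  let fb : PySem.Dict Int (List Char) := PySem.Dict.ofList (fallback.map (fun p => (p.1, p.2.toList)))
  let keys := PySem.List.sorted fb.keys (fun x => x) false
  let cands : PySem.Dict Int (List Char) := PySem.Dict.ofList (keys.map (fun k => (k, pyCandidate pd fb k)))
  -- groups.setdefault(...).append(k) = append k to the entry, starting from []
  let groups : PySem.Dict (List Char) (List Int) :=
    keys.foldl (fun d k => d.modify (PySem.Chars.lower (cands.getD k [])) [] (· ++ [k])) PySem.Dict.empty
  -- occ = {k: i for ks in groups.values() for i, k in enumerate(ks, 1)}
  let occ : PySem.Dict Int Int :=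
    groups.values.foldl (fun d ks => (PySem.List.enumerate ks 1).foldl (fun d q => d.insert q.2 q.1) d) PySem.Dict.empty
  keys.map (fun k => (k, String.ofList (if occ.getD k 0 = 1 then cands.getD k []
    else pyTruncate (cands.getD k [] ++ ' ' :: '(' :: (PySem.Int.toChars (occ.getD k 0) ++ [')'])) 48)))

-- ===== PRECONDITION & SPEC =====
def Spec_dedupe_cluster_names (proposed : List (Int × String)) (fallback : List (Int × String)) (out : List (Int × String)) : Prop := out = dedupe_cluster_names_alt proposed fallback
instance (proposed : List (Int × String)) (fallback : List (Int × String)) (out : List (Int × String)) : Decidable (Spec_dedupe_cluster_names proposed fallback out) := by unfold Spec_dedupe_cluster_names; infer_instance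

-- ===== CLAIM (what is proved, stated in full; the proofs are below) =====
def Claim_equal_dedupe_cluster_names : Prop := ∀ (proposed : List (Int × String)) (fallback : List (Int × String)), Dom_dedupe_cluster_names proposed fallback → Spec_dedupe_cluster_names proposed fallback (dedupe_cluster_names proposed fallback)

-- ===== LEMMAS AND PROOFS =====

-- the final name for a cluster, given the casefolded candidates of the preceding prefix
def pvVal (cand : Int → List Char) (pref : List (List Char)) (k : Int) : List Char :=
  let c := cand k
  let n : Int := (pref.count (PySem.Chars.lower c) : Int) + 1
  if n > 1 then pyTruncate (c ++ ' ' :: '(' :: (PySem.Int.toChars n ++ [')'])) 48 else c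

-- the common output shape: one pair per key, threading the casefolded prefix
def pvOuts (cand : Int → List Char) : List Int → List (List Char) → List (Int × List Char)
  | [], _ => []
  | k :: ks, pref => (k, pvVal cand pref k) :: pvOuts cand ks (pref ++ [PySem.Chars.lower (cand k)])

lemma pvOuts_length (cand : Int → List Char) (ks : List Int) (pref : List (List Char)) :
    (pvOuts cand ks pref).length = ks.length := by
  induction ks generalizing pref with
  | nil => rfl
  | cons k ks ih => simp [pvOuts, ih]

lemma pvOuts_getElem (cand : Int → List Char) (ks : List Int) (pref : List (List Char))
    (i : Nat) (h : i < ks.length) :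
    (pvOuts cand ks pref)[i]'(by rw [pvOuts_length]; exact h)
      = (ks[i], pvVal cand (pref ++ (ks.take i).map (fun k => PySem.Chars.lower (cand k))) ks[i]) := by
  induction ks generalizing pref i with
  | nil => simp at h
  | cons k ks ih =>
    cases i with
    | zero => simp [pvOuts]
    | succ i =>
      simp only [pvOuts, List.getElem_cons_succ, List.take_succ_cons, List.map_cons]
      rw [ih _ _ (by simpa using h)]
      simp

-- A's loop, characterised: starting from counter pref, it appends pvOuts to the final dict's items
lemma pvLoopA (cand : Int → List Char) (ks : List Int) (pref : List (List Char))
    (final : PySem.Dict Int (List Char))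
    (hnd : ks.Nodup) (hfresh : ∀ k ∈ ks, k ∉ final.keys) :
    (ks.foldl
      (fun (st : PySem.Dict Int (List Char) × PySem.Dict (List Char) Int) cid =>
        let c := cand cid
        let seen := st.2.modify (PySem.Chars.lower c) 0 (· + 1)
        let n := seen.getD (PySem.Chars.lower c) 0
        let c' := if n > 1 then pyTruncate (c ++ ' ' :: '(' :: (PySem.Int.toChars n ++ [')'])) 48 else c
        (st.1.insert cid c', seen))
      (final, PySem.Dict.counter pref)).1.items
      = final.items ++ pvOuts cand ks pref := by
  induction ks generalizing pref final with
  | nil => simp [pvOuts]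
  | cons k ks ih =>
    have hf : final.contains k = false := by
      rw [PySem.Dict.contains_eq_decide_mem_keys]
      simp [hfresh k (by simp)]
    simp only [List.foldl_cons]
    rw [← PySem.Dict.counter_append_singleton pref (PySem.Chars.lower (cand k))]
    rw [PySem.Dict.getD_counter]
    have hcount : (((pref ++ [PySem.Chars.lower (cand k)]).count (PySem.Chars.lower (cand k)) : Nat) : Int)
        = (pref.count (PySem.Chars.lower (cand k)) : Int) + 1 := by
      simp [List.count_append]
    rw [hcount]
    rw [ih (pref ++ [PySem.Chars.lower (cand k)]) _ (List.Nodup.of_cons hnd) ?_]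
    · rw [PySem.Dict.items_insert_of_not_contains _ _ hf]
      simp only [pvOuts, pvVal, List.append_assoc, List.singleton_append]
    · intro k' hk'
      simp only [PySem.Dict.keys, PySem.Dict.items_insert_of_not_contains _ _ hf,
        List.map_append, List.mem_append, List.map_cons, List.map_nil, List.mem_cons,
        List.not_mem_nil, or_false]
      rintro (hm | hm)
      · exact hfresh k' (by simp [hk']) (by simpa [PySem.Dict.keys] using hm)
      · subst hm
        exact (List.nodup_cons.mp hnd).1 hk'

-- position of keys[j] inside the filtered list = number of earlier matches
lemma pvFilter_getElem (keys : List Int) (p : Int → Bool) (j : Nat) (hj : j < keys.length)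
    (hp : p keys[j] = true) :
    ∃ hlt : (keys.take j).countP p < (keys.filter p).length,
      (keys.filter p)[(keys.take j).countP p]'hlt = keys[j] := by
  have hsplit : keys.filter p
      = (keys.take j).filter p ++ keys[j] :: (keys.drop (j + 1)).filter p := by
    conv_lhs => rw [← List.take_append_drop j keys]
    rw [List.filter_append, List.drop_eq_getElem_cons hj, List.filter_cons]
    simp [hp]
  have hn : (keys.take j).countP p = ((keys.take j).filter p).length :=
    List.countP_eq_length_filter
  have hlt : (keys.take j).countP p < (keys.filter p).length := by
    rw [hsplit, List.length_append, hn]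
    simp
  refine ⟨hlt, ?_⟩
  have hlt' : (keys.take j).countP p < ((keys.take j).filter p
      ++ keys[j] :: (keys.drop (j + 1)).filter p).length := by rw [← hsplit]; exact hlt
  have hgoal : ((keys.take j).filter p ++ keys[j] :: (keys.drop (j + 1)).filter p)[(keys.take j).countP p]'hlt' = keys[j] := by
    rw [List.getElem_append_right (by omega)]
    simp [hn]
  simpa [hsplit] using hgoal

-- concatenating the groups (filters of keys by distinct casefolded names) stays duplicate-free
lemma pvFlattenNodup (keys : List Int) (g : Int → List Char) (cs : List (List Char))
    (hk : keys.Nodup) (hc : cs.Nodup) :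
    ((cs.map (fun c => keys.filter (fun k => g k == c))).flatten).Nodup := by
  induction cs with
  | nil => simp
  | cons c cs ih =>
    simp only [List.map_cons, List.flatten_cons]
    refine (hk.filter _).append (ih (List.Nodup.of_cons hc)) ?_
    intro k hk1 hk2
    have hg : g k = c := by simpa using List.of_mem_filter hk1
    obtain ⟨l, hl, hm⟩ := List.mem_flatten.mp hk2
    obtain ⟨c', hc', rfl⟩ := List.mem_map.mp hl
    have hg' : g k = c' := by simpa using List.of_mem_filter hm
    exact (List.nodup_cons.mp hc).1 (by rw [← hg', hg] at hc'; exact hc')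

theorem dedupe_cluster_names_spec : Claim_equal_dedupe_cluster_names := by
  intro proposed fallback _
  unfold Spec_dedupe_cluster_names
  set pd : PySem.Dict Int (List Char) := PySem.Dict.ofList (proposed.map (fun p => (p.1, p.2.toList))) with hpd
  set fb : PySem.Dict Int (List Char) := PySem.Dict.ofList (fallback.map (fun p => (p.1, p.2.toList))) with hfb
  set keys : List Int := PySem.List.sorted fb.keys (fun x => x) false with hkeys
  have hnd : keys.Nodup :=
    ((PySem.List.sorted_perm fb.keys (fun x => x) false).nodup_iff).mpr (PySem.Dict.nodup_keys_ofList _)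
  have hA : dedupe_cluster_names proposed fallback
      = (pvOuts (pyCandidate pd fb) keys []).map (fun q => (q.1, String.ofList q.2)) := by
    have h0 := pvLoopA (pyCandidate pd fb) keys [] PySem.Dict.empty hnd
      (by intro k hk; simp [PySem.Dict.keys, PySem.Dict.empty])
    rw [show PySem.Dict.counter ([] : List (List Char)) = PySem.Dict.empty from rfl] at h0
    simpa only [dedupe_cluster_names, ← hpd, ← hfb, ← hkeys, List.nil_append]
      using congrArg (List.map (fun q : Int × List Char => (q.1, String.ofList q.2))) h0
  have hB : dedupe_cluster_names_alt proposed fallback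
      = (pvOuts (pyCandidate pd fb) keys []).map (fun q => (q.1, String.ofList q.2)) := by
    simp only [dedupe_cluster_names_alt, ← hpd, ← hfb, ← hkeys]
    set cnd := pyCandidate pd fb with hcnd
    set cands : PySem.Dict Int (List Char) :=
      PySem.Dict.ofList (keys.map (fun k => (k, cnd k))) with hcands
    set groups : PySem.Dict (List Char) (List Int) :=
      keys.foldl (fun d k => d.modify (PySem.Chars.lower (cands.getD k [])) [] (· ++ [k]))
        PySem.Dict.empty with hgroups
    set occ : PySem.Dict Int Int :=
      groups.values.foldl
        (fun d ks => (PySem.List.enumerate ks 1).foldl (fun d q => d.insert q.2 q.1) d)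
        PySem.Dict.empty with hocc
    -- stage 1: the candidates dictionary
    have hitems : cands.items = keys.map (fun k => (k, cnd k)) := by
      have h := PySem.Dict.items_foldl_insert_fresh (keys.map (fun k => (k, cnd k)))
        Prod.fst Prod.snd PySem.Dict.empty (fun a _ => rfl)
        (by simpa [List.map_map, Function.comp_def] using hnd)
      simpa using h
    have hkc : cands.keys = keys := by
      simp [PySem.Dict.keys, hitems, List.map_map, Function.comp_def]
    have hcget : ∀ k ∈ keys, cands.getD k [] = cnd k := by
      intro k hk
      exact PySem.Dict.getD_of_mem_items cands
        (by rw [hitems]; exact List.mem_map_of_mem hk) (by rw [hkc]; exact hnd) []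
    -- stage 2: the groups dictionary
    have hg2 : groups = keys.foldl
        (fun d k => d.modify (PySem.Chars.lower (cnd k)) [] (· ++ [k])) PySem.Dict.empty := by
      rw [hgroups]
      exact PySem.List.foldl_congr_mem' keys _ _ _ (fun k hk acc => by rw [hcget k hk])
    have hgv : ∀ c, groups.getD c []
        = keys.filter (fun k => PySem.Chars.lower (cnd k) == c) := by
      intro c
      have h := PySem.Dict.getD_foldl_modify_append
        (keys.map (fun k => (PySem.Chars.lower (cnd k), k))) PySem.Dict.empty c
      rw [List.foldl_map, List.filter_map] at h
      simpa [hg2, List.map_map, Function.comp_def] using h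
    have hgkeys : groups.keys
        = PySem.Set.ofList (keys.map (fun k => PySem.Chars.lower (cnd k))) := by
      rw [hg2, PySem.Dict.keys_foldl_modify_key keys (fun k => PySem.Chars.lower (cnd k)) []
        (fun _ k => (· ++ [k])) PySem.Dict.empty]
      rfl
    have hgnd : groups.keys.Nodup := by rw [hgkeys]; exact PySem.Set.nodup_ofList _
    have hvals : groups.values
        = (PySem.Set.ofList (keys.map (fun k => PySem.Chars.lower (cnd k)))).map
            (fun c => keys.filter (fun k => PySem.Chars.lower (cnd k) == c)) := by
      rw [PySem.Dict.values_eq_map_keys groups hgnd [], hgkeys]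
      exact List.map_congr_left (fun c _ => hgv c)
    -- stage 3: the occurrence-index dictionary
    have hof : occ = (groups.values.flatMap (fun ks => PySem.List.enumerate ks 1)).foldl
        (fun d q => d.insert q.2 q.1) PySem.Dict.empty := by
      rw [hocc]; exact Eq.symm List.foldl_flatMap
    have hPsnd : (groups.values.flatMap (fun ks => PySem.List.enumerate ks 1)).map (·.2)
        = groups.values.flatten := by
      rw [List.map_flatMap]
      simp [PySem.List.map_snd_enumerate]
    have hPnd : ((groups.values.flatMap (fun ks => PySem.List.enumerate ks 1)).map (·.2)).Nodup := by
      rw [hPsnd, hvals]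
      exact pvFlattenNodup keys _ _ hnd (PySem.Set.nodup_ofList _)
    have hoItems : occ.items = (groups.values.flatMap (fun ks => PySem.List.enumerate ks 1)).map
        (fun q => (q.2, q.1)) := by
      rw [hof]
      have h := PySem.Dict.items_foldl_insert_fresh
        (groups.values.flatMap (fun ks => PySem.List.enumerate ks 1))
        (fun q => q.2) (fun q => q.1) PySem.Dict.empty (fun a _ => rfl) hPnd
      simpa using h
    have hond : occ.keys.Nodup := by
      have h : occ.keys = (groups.values.flatMap (fun ks => PySem.List.enumerate ks 1)).map (·.2) := by
        simp [PySem.Dict.keys, hoItems, List.map_map, Function.comp]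
      rw [h]; exact hPnd
    have hoccD : ∀ (j : Nat) (hj : j < keys.length), occ.getD keys[j] 0
        = 1 + ((keys.take j).countP
            (fun k => PySem.Chars.lower (cnd k) == PySem.Chars.lower (cnd keys[j])) : Int) := by
      intro j hj
      obtain ⟨hlt, hget⟩ := pvFilter_getElem keys
        (fun k => PySem.Chars.lower (cnd k) == PySem.Chars.lower (cnd keys[j])) j hj (by simp)
      refine PySem.Dict.getD_of_mem_items occ ?_ hond 0
      rw [hoItems]
      refine List.mem_map.mpr ⟨(1 + ((keys.take j).countP _ : Int), keys[j]), ?_, rfl⟩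
      refine List.mem_flatMap.mpr
        ⟨keys.filter (fun k => PySem.Chars.lower (cnd k) == PySem.Chars.lower (cnd keys[j])), ?_, ?_⟩
      · rw [hvals]
        exact List.mem_map.mpr ⟨PySem.Chars.lower (cnd keys[j]),
          (PySem.Set.mem_ofList _ _).mpr (List.mem_map_of_mem (List.getElem_mem hj)), rfl⟩
      · exact (PySem.List.mem_enumerate_iff _ 1 _).mpr
          ⟨(keys.take j).countP _, hlt, by rw [hget]⟩
    -- final assembly, elementwise
    apply List.ext_getElem
    · simp [pvOuts_length]
    · intro j h1 h2
      have hj : j < keys.length := by simpa using h1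
      simp only [List.getElem_map]
      rw [pvOuts_getElem _ _ _ j hj]
      simp only [List.nil_append]
      rw [hcget keys[j] (List.getElem_mem hj), hoccD j hj]
      simp only [pvVal]
      rw [show ((keys.take j).map (fun k => PySem.Chars.lower (cnd k))).count
            (PySem.Chars.lower (cnd keys[j]))
          = (keys.take j).countP
            (fun k => PySem.Chars.lower (cnd k) == PySem.Chars.lower (cnd keys[j])) by
        rw [List.count, List.countP_map]; rfl]
      set cnt := (keys.take j).countP
        (fun k => PySem.Chars.lower (cnd k) == PySem.Chars.lower (cnd keys[j])) with hcnt
      by_cases hz : cnt = 0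
      · have h1' : (1 : Int) + (cnt : Int) = 1 := by omega
        have h2' : ¬ (((cnt : Nat) : Int) + 1 > 1) := by omega
        rw [if_pos h1', if_neg h2']
      · have h1' : ¬ ((1 : Int) + (cnt : Int) = 1) := by omega
        have h2' : (((cnt : Nat) : Int) + 1 > 1) := by omega
        rw [if_neg h1', if_pos h2', show (1 : Int) + (cnt : Int) = (cnt : Int) + 1 by omega]
  rw [hA, hB]
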